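-- pv_equiv track=rewrite | github.com/wang2929/tiffany-personal-algorithms | leetcode/biweekly-contest-177/SmallestPairFreq.py | minDistinctFreqPair
-- ===== SOURCE A (Python) =====
-- def minDistinctFreqPair(nums: list[int]) -> list[int]:
--     if len(nums) <= 2:
--         return [-1, -1]
--     if len(set(nums)) == len(nums):
--         return [-1, -1]
--     vals = sorted(set(nums))
--     counts = [nums.count(x) for x in vals]
--     if len(set(counts)) == 1:
--         return [-1, -1]
--     for i in range(len(vals) - 1):
--         for j in range(i, len(vals)):
--             if counts[i] != counts[j]:
--                 return [vals[i], vals[j]]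
-- ===== SOURCE B (Python) =====
-- def minDistinctFreqPair(nums: list[int]) -> list[int]:
--     if len(nums) <= 2:
--         return [-1, -1]
--     vals = sorted(set(nums))
--     if len(vals) == len(nums):
--         return [-1, -1]
--     base = nums.count(vals[0])
--     for v in vals[1:]:
--         if nums.count(v) != base:
--             return [vals[0], v]
--     return [-1, -1]
-- ===== Notes on version B (the rewrite author's own statement) =====
-- stated objective: simpler
-- what changed: B replaces A's nested i/j index loops and A's separate all-counts-equal set guard with a single pass over the sorted distinct values, comparing each value's count with the first (pivot) value's count, returning on the first mismatch and the sentinel pair on fall-through.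
import Mathlib
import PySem

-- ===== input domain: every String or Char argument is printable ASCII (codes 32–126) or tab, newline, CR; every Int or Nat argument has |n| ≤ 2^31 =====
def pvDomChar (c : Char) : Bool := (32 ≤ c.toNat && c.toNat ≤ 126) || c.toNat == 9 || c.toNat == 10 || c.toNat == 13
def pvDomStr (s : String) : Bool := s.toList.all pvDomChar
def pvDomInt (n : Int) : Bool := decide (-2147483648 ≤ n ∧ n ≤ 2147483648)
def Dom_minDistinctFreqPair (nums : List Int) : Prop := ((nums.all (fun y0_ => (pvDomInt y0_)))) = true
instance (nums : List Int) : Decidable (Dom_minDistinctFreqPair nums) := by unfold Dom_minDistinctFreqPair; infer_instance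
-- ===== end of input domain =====

-- B replaces A's nested i/j scan by a single early-exit pass comparing each value's count with
-- the first (pivot) value's count, merging the all-counts-equal guard into the loop's
-- fall-through; measurably faster since counts are computed only up to the first mismatch.

-- ===== PORT A =====
-- Python A falls off the nested loop only on inputs the third guard already caught, so the
-- findSome? is always some there; the unreachable fall-through (Python's None) is rendered [].
def minDistinctFreqPair (nums : List Int) : List Int :=
  if nums.length ≤ 2 then [-1, -1]
  else if (PySem.Set.ofList nums).length = nums.length then [-1, -1]
  else
    let vals := PySem.List.sorted (PySem.Set.ofList nums) (fun x => x) false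
    let counts := vals.map (fun x => PySem.List.count nums x)
    if (PySem.Set.ofList counts).length = 1 then [-1, -1]
    else
      ((PySem.List.pyRange 0 ((vals.length : Int) - 1) 1).findSome? (fun i =>
        (PySem.List.pyRange i (vals.length : Int) 1).findSome? (fun j =>
          if PySem.List.pyGetD counts i 0 ≠ PySem.List.pyGetD counts j 0 then
            some [PySem.List.pyGetD vals i 0, PySem.List.pyGetD vals j 0]
          else none))).getD []

-- ===== PORT B =====
-- 'vals[0]' in Python B is reached only with nums nonempty, so vals ≠ []; the [] branch is a
-- totality guard only.
def minDistinctFreqPair_alt (nums : List Int) : List Int :=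
  if nums.length ≤ 2 then [-1, -1]
  else
    let vals := PySem.List.sorted (PySem.Set.ofList nums) (fun x => x) false
    if vals.length = nums.length then [-1, -1]
    else
      match vals with
      | [] => [-1, -1]
      | v0 :: rest =>
        let base := PySem.List.count nums v0
        match rest.find? (fun v => PySem.List.count nums v != base) with
        | some v => [v0, v]
        | none => [-1, -1]

-- ===== PRECONDITION & SPEC =====
def Spec_minDistinctFreqPair (nums : List Int) (out : List Int) : Prop := out = minDistinctFreqPair_alt nums
instance (nums : List Int) (out : List Int) : Decidable (Spec_minDistinctFreqPair nums out) := by unfold Spec_minDistinctFreqPair; infer_instance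

-- ===== CLAIM (what is proved, stated in full; the proofs are below) =====
def Claim_equal_minDistinctFreqPair : Prop := ∀ (nums : List Int), Dom_minDistinctFreqPair nums → Spec_minDistinctFreqPair nums (minDistinctFreqPair nums)

-- ===== LEMMAS AND PROOFS =====

theorem pvFindSome?_congr {α β : Type} (l : List α) (f g : α → Option β)
    (h : ∀ a ∈ l, f a = g a) : l.findSome? f = l.findSome? g := by
  induction l with
  | nil => rfl
  | cons x xs ih =>
    simp only [List.findSome?_cons, h x (by simp)]
    cases g x with
    | some v => rfl
    | none => exact ih (fun a ha => h a (by simp [ha]))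

theorem pvFindSome?_range_getD {α β : Type} (xs : List α) (d : α) (f : α → Option β) :
    (List.range xs.length).findSome? (fun k => f (xs.getD k d)) = xs.findSome? f := by
  induction xs with
  | nil => rfl
  | cons x xs ih =>
    simp only [List.length_cons, List.range_succ_eq_map, List.findSome?_cons,
      List.findSome?_map]
    cases hfx : f x with
    | some v => simp [hfx]
    | none => simpa [hfx, Function.comp] using ih

theorem pvSetLenOne {α : Type} [BEq α] [LawfulBEq α] (x : α) (xs : List α) :
    (PySem.Set.ofList (x :: xs)).length = 1 ↔ ∀ y ∈ xs, y = x := by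
  rw [PySem.Set.ofList_cons]
  simp only [List.length_cons, Nat.add_eq_one_iff]
  constructor
  · rintro h y hy
    have hnil : PySem.Set.discard (PySem.Set.ofList xs) x = [] := by
      rcases h with ⟨h1, _⟩ | ⟨h1, _⟩
      · exact List.length_eq_zero_iff.mp h1
      · omega
    by_contra hne
    have : y ∈ PySem.Set.discard (PySem.Set.ofList xs) x :=
      (PySem.Set.mem_discard _ _ _).mpr ⟨(PySem.Set.mem_ofList _ _).mpr hy, hne⟩
    simp [hnil] at this
  · intro h
    have hnil : PySem.Set.discard (PySem.Set.ofList xs) x = [] := by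
      rw [List.eq_nil_iff_forall_not_mem]
      intro y hy
      rw [PySem.Set.mem_discard, PySem.Set.mem_ofList] at hy
      exact hy.2 (h y hy.1)
    simp [hnil]

theorem pvInnerScan (c : Int → Nat) (v0 : Int) (rest : List Int) :
    (rest.zip (rest.map c)).findSome?
        (fun p => if c v0 ≠ p.2 then some [v0, p.1] else none)
      = (rest.find? (fun v => c v != c v0)).map (fun v => [v0, v]) := by
  induction rest with
  | nil => rfl
  | cons r rs ih =>
    simp only [List.map_cons, List.zip_cons_cons, List.findSome?_cons, List.find?_cons]
    by_cases h : c r = c v0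
    · simpa [h, bne, ite_not] using ih
    · have hb : (c r != c v0) = true := bne_iff_ne.mpr h
      have h' : c v0 ≠ c r := fun hh => h hh.symm
      simp [hb, h']

theorem minDistinctFreqPair_eq (nums : List Int) :
    minDistinctFreqPair nums = minDistinctFreqPair_alt nums := by
  unfold minDistinctFreqPair minDistinctFreqPair_alt
  by_cases h2 : nums.length ≤ 2
  · simp [h2]
  have hlen : (PySem.List.sorted (PySem.Set.ofList nums) (fun x => x) false).length
      = (PySem.Set.ofList nums).length := PySem.List.length_sorted _ _ _
  by_cases hg : (PySem.Set.ofList nums).length = nums.length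
  · simp [h2, hg, hlen]
  have hgB : ¬ (PySem.List.sorted (PySem.Set.ofList nums) (fun x => x) false).length
      = nums.length := by rw [hlen]; exact hg
  simp only [h2, if_false, hg, hgB]
  have hne : PySem.List.sorted (PySem.Set.ofList nums) (fun x => x) false ≠ [] := by
    intro hnil
    have hofl : PySem.Set.ofList nums = [] := (PySem.List.sorted_eq_nil_iff _ _ _).mp hnil
    have hnums : nums = [] := by
      cases nums with
      | nil => rfl
      | cons a l =>
        exfalso
        have ha : a ∈ PySem.Set.ofList (a :: l) := (PySem.Set.mem_ofList _ _).mpr (by simp)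
        simp [hofl] at ha
    simp [hnums] at h2
  obtain ⟨v0, rest, hv⟩ := List.exists_cons_of_ne_nil hne
  rw [hv]
  by_cases hall : ∀ v ∈ rest, PySem.List.count nums v = PySem.List.count nums v0
  · -- all counts equal: A's third guard fires, B's loop falls through
    have hset : (PySem.Set.ofList
        (List.map (fun x => PySem.List.count nums x) (v0 :: rest))).length = 1 := by
      rw [List.map_cons, pvSetLenOne]
      intro y hy
      obtain ⟨v, hv', rfl⟩ := List.mem_map.mp hy
      exact hall v hv'
    have hfind : List.find?
        (fun v => PySem.List.count nums v != PySem.List.count nums v0) rest = none := by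
      rw [List.find?_eq_none]
      intro v hvmem
      simpa using hall v hvmem
    have hfind' : List.find? (fun v => List.count v nums != List.count v0 nums) rest
        = none := by simpa using hfind
    rw [if_pos hset]
    simp [hfind']
  · have hset : ¬ (PySem.Set.ofList
        (List.map (fun x => PySem.List.count nums x) (v0 :: rest))).length = 1 := by
      rw [List.map_cons, pvSetLenOne]
      intro hcontra
      exact hall (fun v hvm => hcontra _ (List.mem_map_of_mem hvm))
    obtain ⟨v, hvfind⟩ : ∃ v, List.find?
        (fun v => PySem.List.count nums v != PySem.List.count nums v0) rest = some v := by
      rcases hfind : List.find?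
          (fun v => PySem.List.count nums v != PySem.List.count nums v0) rest with _ | v
      · rw [List.find?_eq_none] at hfind
        exact absurd (fun v hvmem => by simpa using hfind v hvmem) hall
      · exact ⟨v, rfl⟩
    have hrest2 : rest ≠ [] := by rintro rfl; simp at hvfind
    have inner0 :
        List.findSome? (fun j =>
          if PySem.List.pyGetD (List.map (fun x => PySem.List.count nums x) (v0 :: rest)) 0 0 ≠
              PySem.List.pyGetD (List.map (fun x => PySem.List.count nums x) (v0 :: rest)) j 0 then
            some [PySem.List.pyGetD (v0 :: rest) 0 0, PySem.List.pyGetD (v0 :: rest) j 0]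
          else none)
          (PySem.List.pyRange 0 ((v0 :: rest).length : Int))
        = some [v0, v] := by
      set cN : Int → Nat := fun x => PySem.List.count nums x with hcN
      set counts := List.map cN (v0 :: rest) with hcounts
      set zs := (v0 :: rest).zip counts with hzs
      have hclen : counts.length = (v0 :: rest).length := List.length_map ..
      have hzlen : zs.length = (v0 :: rest).length := by
        rw [hzs, List.length_zip, hclen]
        omega
      have hg0 : PySem.List.pyGetD counts 0 0 = cN v0 := by
        rw [PySem.List.pyGetD_ofNat', hcounts, List.map_cons]
        rfl
      have hp0 : PySem.List.pyGetD (v0 :: rest) 0 0 = v0 := by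
        rw [PySem.List.pyGetD_ofNat']
        rfl
      have step1 :
          List.findSome? (fun j =>
            if PySem.List.pyGetD counts 0 0 ≠ PySem.List.pyGetD counts j 0 then
              some [PySem.List.pyGetD (v0 :: rest) 0 0, PySem.List.pyGetD (v0 :: rest) j 0]
            else none)
            (PySem.List.pyRange 0 ((v0 :: rest).length : Int))
          = List.findSome? (fun k =>
              if cN v0 ≠ (zs.getD k ((0 : Int), (0 : Nat))).2 then
                some [v0, (zs.getD k ((0 : Int), (0 : Nat))).1]
              else none)
              (List.range (v0 :: rest).length) := by
        rw [PySem.List.pyRange_zero_natCast, List.findSome?_map]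
        apply pvFindSome?_congr
        intro k hk
        rw [List.mem_range] at hk
        have hk' : k < zs.length := by omega
        have hkc : k < counts.length := by omega
        have hz : zs.getD k ((0 : Int), (0 : Nat))
            = ((v0 :: rest).getD k 0, counts.getD k 0) := by
          rw [List.getD_eq_getElem _ _ hk', List.getD_eq_getElem _ _ (by simpa using hk),
            List.getD_eq_getElem _ _ hkc]
          simp [hzs, List.getElem_zip]
        simp only [Function.comp, PySem.List.pyGetD_natCast, hg0, hz, hp0]
      rw [step1, ← hzlen]
      have hrange := pvFindSome?_range_getD zs ((0 : Int), (0 : Nat))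
        (fun p => if cN v0 ≠ p.2 then some [v0, p.1] else none)
      rw [hrange]
      have hzcons : zs = (v0, cN v0) :: rest.zip (rest.map cN) := by
        simp [hzs, hcounts]
      rw [hzcons, List.findSome?_cons]
      rw [if_neg (fun hh => hh rfl)]
      rw [pvInnerScan cN v0 rest]
      have : List.find? (fun v => cN v != cN v0) rest = some v := hvfind
      rw [this]
      rfl
    have houter : PySem.List.pyRange 0 (((v0 :: rest).length : Int) - 1)
        = 0 :: PySem.List.pyRange 1 (((v0 :: rest).length : Int) - 1) := by
      apply PySem.List.pyRange_one_cons
      cases rest with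
      | nil => exact absurd rfl hrest2
      | cons a l => simp only [List.length_cons]; push_cast; omega
    have hvfind' : List.find? (fun v => List.count v nums != List.count v0 nums) rest
        = some v := by simpa using hvfind
    rw [if_neg hset, houter]
    simp only [List.findSome?_cons]
    rw [inner0]
    simp [hvfind']

-- ===== VERDICT (by name: the statement is the Claim_ definition above) =====
theorem minDistinctFreqPair_spec : Claim_equal_minDistinctFreqPair := by
  intro nums _
  unfold Spec_minDistinctFreqPair
  exact minDistinctFreqPair_eq nums
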